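-- pv_equiv track=rewrite | github.com/BalticSeabird/echoedge | postprocessing/PhillipIsland2024/functions15.py | inter_positions_new
-- ===== SOURCE A (Python) =====
-- def inter_positions_new(arr):
--     segments = []
--     arr_unique = [arr[0]]
--     for i in range(1,len(arr)):
--         if arr[i] != arr[i-1]:
--             segments.append(i)
--             arr_unique.append(arr[i])
--
--     segments.insert(0, 0)
--     result_dict = {
--         "segments": segments,
--         "unique_values": arr_unique
--     }
--     return result_dict
-- ===== SOURCE B (Python) =====
-- def inter_positions_new(arr):
--     # Run-based scan: jump from run start to run start instead of comparing
--     # every neighbouring pair; record each run's start index and value.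
--     segments = []
--     unique = []
--     i = 0
--     n = len(arr)
--     while i < n:
--         segments.append(i)
--         unique.append(arr[i])
--         j = i + 1
--         while j < n and arr[j] == arr[i]:
--             j += 1
--         i = j
--     return {"segments": segments, "unique_values": unique}
-- ===== Notes on version B (the rewrite author's own statement) =====
-- stated objective: alternative
-- what changed: Replaces A's single pairwise pass (compare each element with its predecessor, collect boundary indices, then prepend the initial index) by a run-based scan that jumps from run start to run start, recording each run's start index and value directly; B returns empty lists on the empty list where A raises IndexError.
-- crash fix: On the empty list A raises IndexError (arr[0]); B returns {"segments": [], "unique_values": []}. — e.g. on inter_positions_new([]): A raises IndexError, B returns [("segments", []), ("unique_values", [])]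
import Mathlib
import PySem

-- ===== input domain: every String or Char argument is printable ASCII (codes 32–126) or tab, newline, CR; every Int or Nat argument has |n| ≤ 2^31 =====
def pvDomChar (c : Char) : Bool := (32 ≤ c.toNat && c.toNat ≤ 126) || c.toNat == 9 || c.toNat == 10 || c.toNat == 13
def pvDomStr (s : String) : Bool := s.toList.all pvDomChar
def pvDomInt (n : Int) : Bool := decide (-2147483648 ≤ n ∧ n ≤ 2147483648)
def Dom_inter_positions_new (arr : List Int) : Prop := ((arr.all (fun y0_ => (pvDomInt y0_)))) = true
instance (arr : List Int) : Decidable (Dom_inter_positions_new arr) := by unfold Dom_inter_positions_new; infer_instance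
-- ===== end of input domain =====

-- B replaces A's pairwise neighbour comparison by a run-based scan that jumps
-- from run start to run start (alternative decomposition, same cost); where A
-- raises IndexError on [], B returns empty lists (see Raises_ block).


-- ===== PORT A =====
-- step of A's 'for i in range(1, len(arr))' loop over the state (segments, arr_unique)
def pvAStep (arr : List Int) (s : List Int × List Int) (i : Int) : List Int × List Int :=
  if PySem.List.pyGetD arr i 0 ≠ PySem.List.pyGetD arr (i - 1) 0 then
    (s.1 ++ [i], s.2 ++ [PySem.List.pyGetD arr i 0])
  else s

def inter_positions_new (arr : List Int) : List (String × List Int) :=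
  let st := (PySem.List.pyRange 1 (arr.length : Int) 1).foldl (pvAStep arr)
      ([], [PySem.List.pyGetD arr 0 0])
  [("segments", 0 :: st.1), ("unique_values", st.2)]

-- ===== PORT B =====
-- inner 'while j < n and arr[j] == arr[i]' loop: count of skipped copies of v and the remaining suffix
def pvSkip (v : Int) : List Int → Nat × List Int
  | [] => (0, [])
  | y :: rest => if y = v then ((pvSkip v rest).1 + 1, (pvSkip v rest).2) else (0, y :: rest)

-- outer 'while i < n' loop of B; the fuel argument only makes the recursion
-- structural (arr.length + 1 steps always suffice, proved in pvRuns_eq_go)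
def pvRuns : Nat → List Int → Int → List Int × List Int
  | 0, _, _ => ([], [])
  | _ + 1, [], _ => ([], [])
  | f + 1, x :: rest, i =>
      let c := (pvSkip x rest).1
      let r := (pvSkip x rest).2
      let su := pvRuns f r (i + 1 + (c : Int))
      (i :: su.1, x :: su.2)

def inter_positions_new_alt (arr : List Int) : List (String × List Int) :=
  let su := pvRuns (arr.length + 1) arr 0
  [("segments", su.1), ("unique_values", su.2)]

-- ===== PRECONDITION & SPEC =====
-- A evaluates arr[0] before its loop, so it raises IndexError on the empty list.
def Pre_inter_positions_new (arr : List Int) : Prop := arr ≠ []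
instance (arr : List Int) : Decidable (Pre_inter_positions_new arr) := by
  unfold Pre_inter_positions_new; infer_instance
def pvWitness_inter_positions_new : List Int := ([1, 1, 2])

-- On the empty list A raises IndexError (arr[0]); B returns {"segments": [], "unique_values": []}.
def Raises_inter_positions_new (arr : List Int) : Prop := arr = []
instance (arr : List Int) : Decidable (Raises_inter_positions_new arr) := by
  unfold Raises_inter_positions_new; infer_instance
def pvRaiseWitness_inter_positions_new : List Int := ([])
def pvRaiseWitnessOut_inter_positions_new : List (String × List Int) :=
  [("segments", []), ("unique_values", [])]

def Spec_inter_positions_new (arr : List Int) (out : List (String × List Int)) : Prop :=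
  out = inter_positions_new_alt arr
instance (arr : List Int) (out : List (String × List Int)) : Decidable (Spec_inter_positions_new arr out) := by
  unfold Spec_inter_positions_new; infer_instance

-- ===== CLAIM (what is proved, stated in full; the proofs are below) =====
def Claim_equal_inter_positions_new : Prop := ∀ (arr : List Int), Dom_inter_positions_new arr → Pre_inter_positions_new arr → Spec_inter_positions_new arr (inter_positions_new arr)
def Claim_raises_inter_positions_new : Prop := (∀ (arr : List Int), Dom_inter_positions_new arr → Raises_inter_positions_new arr → ¬ Pre_inter_positions_new arr) ∧ (Dom_inter_positions_new (pvRaiseWitness_inter_positions_new) ∧ Raises_inter_positions_new (pvRaiseWitness_inter_positions_new) ∧ inter_positions_new_alt (pvRaiseWitness_inter_positions_new) = pvRaiseWitnessOut_inter_positions_new)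

-- ===== LEMMAS AND PROOFS =====

-- common characterisation: run boundaries/values of l when the element before l is v and l starts at index i
def pvGo (v : Int) (i : Int) : List Int → List Int × List Int
  | [] => ([], [])
  | x :: rest =>
      let g := pvGo x (i + 1) rest
      if x ≠ v then (i :: g.1, x :: g.2) else g

theorem pvSkip_head_ne (v : Int) (l : List Int) {y : Int} {r' : List Int}
    (h : (pvSkip v l).2 = y :: r') : y ≠ v := by
  induction l with
  | nil => simp [pvSkip] at h
  | cons z zs ih =>
    by_cases hz : z = v
    · exact ih (by simpa [pvSkip, hz] using h)
    · simp [pvSkip, hz] at h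
      exact h.1 ▸ hz

theorem pvSkip_len_eq (v : Int) (l : List Int) :
    (pvSkip v l).2.length + (pvSkip v l).1 = l.length := by
  induction l with
  | nil => simp [pvSkip]
  | cons z zs ih => by_cases hz : z = v <;> simp [pvSkip, hz] <;> omega

theorem pvGo_skip (l : List Int) (x : Int) (j : Int) :
    pvGo x j l = pvGo x (j + ((pvSkip x l).1 : Int)) (pvSkip x l).2 := by
  induction l generalizing j with
  | nil => simp [pvSkip]
  | cons y rest ih =>
    by_cases h : y = x
    · subst h
      have h1 : pvGo y j (y :: rest) = pvGo y (j + 1) rest := by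
        simp [pvGo]
      rw [h1, ih (j + 1)]
      have h2 : pvSkip y (y :: rest) = ((pvSkip y rest).1 + 1, (pvSkip y rest).2) := by
        simp [pvSkip]
      rw [h2, show j + (((pvSkip y rest).1 + 1 : Nat) : Int)
            = (j + 1) + ((pvSkip y rest).1 : Int) from by push_cast; ring]
    · simp [pvSkip, h]

theorem pvRuns_nil (f : Nat) (i : Int) : pvRuns f [] i = ([], []) := by
  cases f <;> rfl

theorem pvRuns_eq_go (f : Nat) (l : List Int) (hl : l.length < f) (x : Int) (i : Int) :
    pvRuns (f + 1) (x :: l) i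
      = (i :: (pvGo x (i + 1) l).1, x :: (pvGo x (i + 1) l).2) := by
  induction f generalizing l x i with
  | zero => omega
  | succ f ih =>
    have hskip := pvGo_skip l x (i + 1)
    have hlen := pvSkip_len_eq x l
    rcases hr : (pvSkip x l).2 with _ | ⟨y, r'⟩
    · have hgo : pvGo x (i + 1) l = ([], []) := by
        rw [hskip, hr]; simp [pvGo]
      rw [pvRuns, hr, pvRuns_nil]
      simp [hgo]
    · have hy : y ≠ x := pvSkip_head_ne x l hr
      have hlt : r'.length < f := by rw [hr] at hlen; simp at hlen; omega
      rw [pvRuns, hr]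
      rw [ih r' hlt y _]
      rw [hskip, hr]
      simp only [pvGo]
      rw [if_pos hy]

-- A-side characterisation of the index loop
theorem pvA_loop (arr : List Int) :
    ∀ (l : List Int) (k : Nat) (v : Int) (acc : List Int × List Int),
      arr.drop k = l → 1 ≤ k → PySem.List.pyGetD arr ((k : Int) - 1) 0 = v →
      (PySem.List.pyRange (k : Int) (arr.length : Int) 1).foldl (pvAStep arr) acc
        = (acc.1 ++ (pvGo v (k : Int) l).1, acc.2 ++ (pvGo v (k : Int) l).2) := by
  intro l
  induction l with
  | nil =>
    intro k v acc hd hk hv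
    have hle : arr.length ≤ k := by
      have := List.drop_eq_nil_iff.mp hd
      omega
    rw [PySem.List.pyRange_one_eq_nil (by exact_mod_cast hle)]
    simp [pvGo]
  | cons x rest ih =>
    intro k v acc hd hk hv
    have hklt : k < arr.length := by
      by_contra hcon
      rw [List.drop_eq_nil_iff.mpr (by omega)] at hd
      exact absurd hd (by simp)
    have hx : PySem.List.pyGetD arr (k : Int) 0 = x := by
      rw [PySem.List.pyGetD_natCast, List.getD_eq_getElem arr 0 hklt]
      have h0 : (arr.drop k)[0]'(by rw [hd]; simp) = x := by simp [hd]
      rw [List.getElem_drop] at h0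
      simpa using h0
    rw [PySem.List.pyRange_one_cons (by exact_mod_cast hklt)]
    simp only [List.foldl_cons]
    have hstep : pvAStep arr acc (k : Int) =
        if x ≠ v then (acc.1 ++ [(k : Int)], acc.2 ++ [x]) else acc := by
      simp only [pvAStep, hx, hv]
    have hd' : arr.drop (k + 1) = rest := by
      rw [← List.drop_drop, hd]; simp
    have hv' : PySem.List.pyGetD arr (((k + 1 : Nat) : Int) - 1) 0 = x := by
      push_cast; simpa using hx
    have hrec := ih (k + 1) x (pvAStep arr acc (k : Int)) hd' (by omega) hv'
    have hcast : ((k + 1 : Nat) : Int) = (k : Int) + 1 := by push_cast; ring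
    rw [hcast] at hrec
    rw [hrec, hstep]
    by_cases hxv : x = v
    · simp [pvGo, hxv]
    · simp [pvGo, hxv]

-- ===== VERDICT (by name: the statement is the Claim_ definition above) =====
theorem inter_positions_new_spec : Claim_equal_inter_positions_new := by
  intro arr _ hpre
  unfold Spec_inter_positions_new
  rcases harr : arr with _ | ⟨a, rest⟩
  · exact absurd harr hpre
  subst harr
  have ha : PySem.List.pyGetD (a :: rest) (0 : Int) 0 = a := by
    simp [pysem]
  have hloop := pvA_loop (a :: rest) rest 1 a ([], [a]) (by simp) (by omega)
      (by simpa using ha)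
  have hruns := pvRuns_eq_go (rest.length + 1) rest (by omega) a 0
  simp only [inter_positions_new, inter_positions_new_alt]
  simp only [Nat.cast_one] at hloop
  rw [ha, hloop]
  simp [hruns]

@[simp] theorem inter_positions_new_raises : Claim_raises_inter_positions_new := by
  unfold Claim_raises_inter_positions_new
  exact ⟨fun arr _ hr => by simp [Raises_inter_positions_new] at hr; simp [Pre_inter_positions_new, hr],
    by decide⟩
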